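-- pv_equiv track=rewrite | github.com/jackys-95/coding-practice | python/Google/max_span.py | max_span
-- ===== SOURCE A (Python) =====
-- def max_span(a):
--     '''
--     a is a list of ints
--     '''
--     int_map = {}
--     for i in range(len(a)):
--         if a[i] not in int_map:
--             int_map[a[i]] = [i]
--         else:
--             if len(int_map[a[i]]) == 1:
--                 int_map[a[i]].append(i)
--             else:
--                 int_map[a[i]][1] = i
--     maximum_span = -1
--     for item in int_map.values():
--         span_value = 0
--         if len(item) == 1:
--             span_value = 1
--         else:
--             span_value = item[1] - item[0] + 1
--         if span_value > maximum_span: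
--             maximum_span = span_value
--     return maximum_span
-- ===== SOURCE B (Python) =====
-- def max_span(a):
--     first = {}
--     best = -1
--     for i, x in enumerate(a):
--         if x not in first:
--             first[x] = i
--         span = i - first[x] + 1
--         if span > best:
--             best = span
--     return best
-- ===== Notes on version B (the rewrite author's own statement) =====
-- stated objective: simpler
-- what changed: Replaces A's two-phase scheme (build a dict of [first,last] index lists, then a second pass over the dict values) by a single pass over the array that records only each value's first-seen index and folds the span maximum into the same loop.
import Mathlib
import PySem

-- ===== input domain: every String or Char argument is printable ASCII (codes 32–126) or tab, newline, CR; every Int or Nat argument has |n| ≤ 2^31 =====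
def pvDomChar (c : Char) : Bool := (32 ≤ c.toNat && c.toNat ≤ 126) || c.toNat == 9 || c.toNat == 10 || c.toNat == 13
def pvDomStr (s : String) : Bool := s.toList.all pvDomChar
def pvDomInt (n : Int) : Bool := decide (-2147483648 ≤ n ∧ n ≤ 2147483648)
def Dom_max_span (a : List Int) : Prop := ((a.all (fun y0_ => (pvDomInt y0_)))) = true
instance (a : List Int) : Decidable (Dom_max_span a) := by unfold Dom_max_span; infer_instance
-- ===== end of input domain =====

-- B replaces A's two-phase [first,last]-dict plus values pass by a single array pass that keeps only first-seen indices (simpler).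


-- ===== PORT A =====
-- first loop of A: build int_map : value -> [first] or [first, last] occurrence indices
def max_span_dict (a : List Int) : PySem.Dict Int (List Int) :=
  (PySem.List.pyRange 0 (PySem.List.len a) 1).foldl
    (fun d i =>
      let x := PySem.List.pyGetD a i 0          -- a[i]; i ∈ range(len(a)) is always in range
      if d.contains x = false then d.insert x [i]
      else if (d.getD x []).length = 1 then d.insert x (d.getD x [] ++ [i])
      else d.insert x ((d.getD x []).set 1 i))
    PySem.Dict.empty

-- second loop of A: fold the span maximum over the dict values
def max_span (a : List Int) : Int :=
  ((max_span_dict a).values).foldl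
    (fun m item =>
      let s : Int := if item.length = 1 then 1
                     else PySem.List.pyGetD item 1 0 - PySem.List.pyGetD item 0 0 + 1
      if s > m then s else m)
    (-1)

-- ===== PORT B =====
def max_span_alt (a : List Int) : Int :=
  ((PySem.List.enumerate a).foldl
    (fun (st : PySem.Dict Int Int × Int) q =>
      let first := if st.1.contains q.2 = false then st.1.insert q.2 q.1 else st.1
      let span := q.1 - first.getD q.2 0 + 1
      (first, if span > st.2 then span else st.2))
    (PySem.Dict.empty, -1)).2

-- ===== PRECONDITION & SPEC =====
def Spec_max_span (a : List Int) (out : Int) : Prop := out = max_span_alt a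
instance (a : List Int) (out : Int) : Decidable (Spec_max_span a out) := by unfold Spec_max_span; infer_instance

-- ===== CLAIM (what is proved, stated in full; the proofs are below) =====
def Claim_equal_max_span : Prop := ∀ (a : List Int), Dom_max_span a → Spec_max_span a (max_span a)

-- ===== LEMMAS AND PROOFS =====

def firstI (p : List Int) (x : Int) : Int := (p.idxOf x : Int)
def lastI (p : List Int) (x : Int) : Int := (p.length : Int) - 1 - (p.reverse.idxOf x : Int)

lemma firstI_append_not_mem {p : List Int} {y : Int} (h : y ∉ p) :
    firstI (p ++ [y]) y = (p.length : Int) := by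
  unfold firstI; rw [List.idxOf_append_of_notMem h]; simp

lemma firstI_append_mem {p : List Int} {x : Int} (y : Int) (h : x ∈ p) :
    firstI (p ++ [y]) x = firstI p x := by
  unfold firstI; rw [List.idxOf_append_of_mem h]

lemma lastI_append_self (p : List Int) (y : Int) : lastI (p ++ [y]) y = (p.length : Int) := by
  unfold lastI
  rw [List.reverse_append]
  simp [List.idxOf_cons_self]

lemma lastI_append_ne {x y : Int} (p : List Int) (h : x ≠ y) :
    lastI (p ++ [y]) x = lastI p x := by
  unfold lastI
  rw [List.reverse_append]
  simp only [List.reverse_singleton, List.singleton_append, List.idxOf_cons_ne _ (Ne.symm h),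
    List.length_append, List.length_singleton]
  push_cast
  ring

lemma lastI_eq_firstI_of_count_one {p : List Int} {x : Int} (h : p.count x = 1) :
    lastI p x = firstI p x := by
  induction p with
  | nil => simp at h
  | cons a p ih =>
    by_cases hax : a = x
    · subst hax
      have hx : a ∉ p := by
        rw [List.count_cons_self] at h
        rw [← List.count_pos_iff]
        omega
      unfold lastI firstI
      rw [List.reverse_cons, List.idxOf_append_of_notMem (by simpa using hx)]
      simp [List.idxOf_cons_self]
    · have h : p.count x = 1 := by
        rw [List.count_cons] at h
        simp [hax] at h
        exact h
      have hmem : x ∈ p := by rw [← List.count_pos_iff]; omega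
      have := ih h
      unfold lastI firstI at *
      rw [List.reverse_cons, List.idxOf_append_of_mem (by simpa using hmem),
        List.idxOf_cons_ne _ hax]
      simp only [List.length_cons] at *
      push_cast at *
      omega

lemma lastI_le (p : List Int) (x : Int) : lastI p x ≤ (p.length : Int) - 1 := by
  unfold lastI
  have : (0:Int) ≤ (p.reverse.idxOf x : Int) := Int.natCast_nonneg _
  omega

def stepA (d : PySem.Dict Int (List Int)) (q : Int × Int) : PySem.Dict Int (List Int) :=
  if d.contains q.2 = false then d.insert q.2 [q.1]
  else if (d.getD q.2 []).length = 1 then d.insert q.2 (d.getD q.2 [] ++ [q.1])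
  else d.insert q.2 ((d.getD q.2 []).set 1 q.1)

def dictA (a : List Int) : PySem.Dict Int (List Int) :=
  (PySem.List.enumerate a).foldl stepA PySem.Dict.empty

lemma max_span_dict_eq (a : List Int) : max_span_dict a = dictA a := by
  unfold max_span_dict dictA
  rw [PySem.List.enumerate_eq_map_pyRange a 0, List.foldl_map]
  rfl

lemma foldl_max_shift (v : List Int) : ∀ b c : Int, v.foldl max (max b c) = max c (v.foldl max b) := by
  induction v with
  | nil => intro b c; simp [max_comm]
  | cons a v ih =>
    intro b c
    simp only [List.foldl_cons]
    rw [max_right_comm, ih]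

lemma foldl_max_middle (u v : List Int) (b c : Int) :
    (u ++ c :: v).foldl max b = max c ((u ++ v).foldl max b) := by
  rw [List.foldl_append, List.foldl_append, List.foldl_cons, foldl_max_shift]

def entryL (p : List Int) (x : Int) : List Int :=
  if p.count x = 1 then [firstI p x] else [firstI p x, lastI p x]
def spanOf (p : List Int) (x : Int) : Int := lastI p x - firstI p x + 1

lemma enumerate_snoc (p : List Int) (y : Int) :
    PySem.List.enumerate (p ++ [y]) = PySem.List.enumerate p ++ [((p.length : Int), y)] := by
  rw [PySem.List.enumerate_append]
  simp [PySem.List.enumerate_cons, PySem.List.enumerate_nil]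

lemma entryL_append_of_ne {p : List Int} {x y : Int} (hx : x ∈ p) (hxy : x ≠ y) :
    entryL (p ++ [y]) x = entryL p x := by
  have hcnt : (p ++ [y]).count x = p.count x := by
    rw [List.count_append, List.count_singleton, if_neg (by simpa using Ne.symm hxy)]
    simp
  unfold entryL
  rw [hcnt, firstI_append_mem y hx, lastI_append_ne p hxy]

lemma entryL_append_self_not_mem {p : List Int} {y : Int} (hy : y ∉ p) :
    entryL (p ++ [y]) y = [(p.length : Int)] := by
  have hcnt : (p ++ [y]).count y = 1 := by
    rw [List.count_append, List.count_singleton, List.count_eq_zero.mpr hy, if_pos (by simp)]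
  unfold entryL
  rw [hcnt, if_pos rfl, firstI_append_not_mem hy]

lemma entryL_append_self_mem {p : List Int} {y : Int} (hy : y ∈ p) :
    entryL (p ++ [y]) y = [firstI p y, (p.length : Int)] := by
  have hc : 0 < p.count y := List.count_pos_iff.mpr hy
  have hcnt : (p ++ [y]).count y = p.count y + 1 := by
    rw [List.count_append, List.count_singleton, if_pos (by simp)]
  unfold entryL
  rw [hcnt, if_neg (by omega), firstI_append_mem y hy, lastI_append_self]

lemma dictA_items (p : List Int) :
    (dictA p).items = (PySem.Set.ofList p).map (fun x => (x, entryL p x)) := by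
  induction p using List.reverseRecOn with
  | nil => rfl
  | append_singleton p y ih =>
    have hkeys : (dictA p).keys = PySem.Set.ofList p := by
      rw [show (dictA p).keys = (dictA p).items.map (·.1) from rfl, ih, List.map_map]
      exact List.map_id _
    have hnd : (dictA p).keys.Nodup := by rw [hkeys]; exact PySem.Set.nodup_ofList p
    have hstep : dictA (p ++ [y]) = stepA (dictA p) ((p.length : Int), y) := by
      unfold dictA
      rw [enumerate_snoc, List.foldl_append]
      rfl
    by_cases hy : y ∈ p
    · have hcont : (dictA p).contains y = true := by
        rw [PySem.Dict.contains_eq_decide_mem_keys, hkeys]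
        simp [PySem.Set.mem_ofList, hy]
      have hget : (dictA p).getD y [] = entryL p y :=
        PySem.Dict.getD_of_mem_items _
          (by rw [ih]; exact List.mem_map_of_mem ((PySem.Set.mem_ofList _ _).mpr hy)) hnd []
      have hins : stepA (dictA p) ((p.length : Int), y)
          = (dictA p).insert y [firstI p y, (p.length : Int)] := by
        unfold stepA
        rw [if_neg (by simp [hcont]), hget]
        by_cases hc1 : p.count y = 1
        · rw [if_pos (by simp [entryL, hc1])]
          simp [entryL, hc1]
        · rw [if_neg (by simp [entryL, hc1])]
          simp [entryL, hc1, List.set]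
      rw [hstep, hins, PySem.Dict.items_insert_of_contains _ _ hcont, ih,
        PySem.Set.ofList_append_singleton, PySem.Set.add_of_mem ((PySem.Set.mem_ofList _ _).mpr hy),
        List.map_map]
      apply List.map_congr_left
      intro x hxs
      have hx : x ∈ p := (PySem.Set.mem_ofList _ _).mp hxs
      by_cases hxy : x = y
      · subst hxy
        simp [entryL_append_self_mem hx]
      · simp only [Function.comp_apply, beq_iff_eq, if_neg hxy]
        rw [entryL_append_of_ne hx hxy]
    · have hcont : (dictA p).contains y = false := by
        rw [PySem.Dict.contains_eq_decide_mem_keys, hkeys]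
        simp [PySem.Set.mem_ofList, hy]
      rw [hstep]
      unfold stepA
      rw [if_pos hcont, PySem.Dict.items_insert_of_not_contains _ _ hcont, ih,
        PySem.Set.ofList_append_singleton,
        PySem.Set.add_of_not_mem (by simpa [PySem.Set.mem_ofList] using hy),
        List.map_append]
      congr 1
      · apply List.map_congr_left
        intro x hxs
        have hx : x ∈ p := (PySem.Set.mem_ofList _ _).mp hxs
        rw [entryL_append_of_ne hx (fun hh => hy (by rw [← hh]; exact hx))]
      · simp [entryL_append_self_not_mem hy]

lemma spanOf_append_of_ne {p : List Int} {x y : Int} (hx : x ∈ p) (hxy : x ≠ y) :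
    spanOf (p ++ [y]) x = spanOf p x := by
  unfold spanOf; rw [firstI_append_mem y hx, lastI_append_ne p hxy]
lemma spanOf_append_self_mem {p : List Int} {y : Int} (hy : y ∈ p) :
    spanOf (p ++ [y]) y = (p.length : Int) - firstI p y + 1 := by
  unfold spanOf; rw [firstI_append_mem y hy, lastI_append_self]
lemma spanOf_append_self_not_mem {p : List Int} {y : Int} (hy : y ∉ p) :
    spanOf (p ++ [y]) y = 1 := by
  unfold spanOf; rw [firstI_append_not_mem hy, lastI_append_self]; ring

lemma ite_gt_eq_max (m s : Int) : (if s > m then s else m) = max m s := by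
  by_cases h : s > m
  · simp [h, max_eq_right h.le]
  · simp [h, max_eq_left (not_lt.1 h)]

def stepB (st : PySem.Dict Int Int × Int) (q : Int × Int) : PySem.Dict Int Int × Int :=
  let first := if st.1.contains q.2 = false then st.1.insert q.2 q.1 else st.1
  let span := q.1 - first.getD q.2 0 + 1
  (first, if span > st.2 then span else st.2)

lemma stB_spec (p : List Int) :
    (PySem.List.enumerate p).foldl stepB (PySem.Dict.empty, -1)
    = (PySem.Dict.mk ((PySem.Set.ofList p).map (fun x => (x, firstI p x))),
       ((PySem.Set.ofList p).map (fun x => spanOf p x)).foldl max (-1)) := by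
  induction p using List.reverseRecOn with
  | nil => rfl
  | append_singleton p y ih =>
    rw [enumerate_snoc, List.foldl_append, ih]
    set st1 := PySem.Dict.mk ((PySem.Set.ofList p).map (fun x => (x, firstI p x))) with hst1
    have hkeys : st1.keys = PySem.Set.ofList p := by
      rw [show st1.keys = ((PySem.Set.ofList p).map (fun x => (x, firstI p x))).map (·.1) from rfl,
        List.map_map]
      exact List.map_id _
    have hnd : st1.keys.Nodup := by rw [hkeys]; exact PySem.Set.nodup_ofList p
    have hmemp : ∀ x ∈ PySem.Set.ofList p, x ∈ p := fun x hx => (PySem.Set.mem_ofList _ _).mp hx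
    by_cases hy : y ∈ p
    · have hcont : st1.contains y = true := by
        rw [PySem.Dict.contains_eq_decide_mem_keys, hkeys]
        simp [PySem.Set.mem_ofList, hy]
      have hmem : (y, firstI p y) ∈ ((PySem.Set.ofList p).map (fun x => (x, firstI p x))) :=
        List.mem_map_of_mem ((PySem.Set.mem_ofList _ _).mpr hy)
      have hget : st1.getD y 0 = firstI p y :=
        PySem.Dict.getD_of_mem_items _ hmem hnd 0
      have hofl : PySem.Set.ofList (p ++ [y]) = PySem.Set.ofList p := by
        rw [PySem.Set.ofList_append_singleton,
          PySem.Set.add_of_mem ((PySem.Set.mem_ofList _ _).mpr hy)]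
      have hdict : PySem.Dict.mk ((PySem.Set.ofList (p ++ [y])).map
          (fun x => (x, firstI (p ++ [y]) x))) = st1 := by
        rw [hofl, hst1]
        congr 1
        apply List.map_congr_left
        intro x hx
        rw [firstI_append_mem y (hmemp x hx)]
      have hacc : ((PySem.Set.ofList (p ++ [y])).map (fun x => spanOf (p ++ [y]) x)).foldl max (-1)
          = max (((PySem.Set.ofList p).map (fun x => spanOf p x)).foldl max (-1))
              ((p.length : Int) - firstI p y + 1) := by
        obtain ⟨u, v, huv⟩ := List.append_of_mem ((PySem.Set.mem_ofList _ _).mpr hy)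
        have hnod : (PySem.Set.ofList p).Nodup := PySem.Set.nodup_ofList p
        rw [huv] at hnod
        rw [List.nodup_middle] at hnod
        have hyu : y ∉ u := fun hc => (List.nodup_cons.mp hnod).1 (List.mem_append_left _ hc)
        have hyv : y ∉ v := fun hc => (List.nodup_cons.mp hnod).1 (List.mem_append_right _ hc)
        have hup : ∀ x ∈ u, x ∈ p := fun x hx =>
          hmemp x (by rw [huv]; exact List.mem_append_left _ hx)
        have hvp : ∀ x ∈ v, x ∈ p := fun x hx =>
          hmemp x (by rw [huv]; exact List.mem_append_right _ (List.mem_cons_of_mem _ hx))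
        have hmap : ∀ w : List Int, y ∉ w → (∀ x ∈ w, x ∈ p) →
            w.map (fun x => spanOf (p ++ [y]) x) = w.map (fun x => spanOf p x) := by
          intro w hyw hwp
          apply List.map_congr_left
          intro x hxw
          exact spanOf_append_of_ne (hwp x hxw) (fun hh => hyw (hh ▸ hxw))
        rw [hofl, huv, List.map_append, List.map_append, List.map_cons, List.map_cons,
          hmap u hyu hup, hmap v hyv hvp, spanOf_append_self_mem hy,
          foldl_max_middle, foldl_max_middle, ← List.map_append]
        have hle : spanOf p y ≤ (p.length : Int) - firstI p y + 1 := by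
          have h1 := lastI_le p y
          unfold spanOf
          omega
        omega
      rw [List.foldl_cons, List.foldl_nil]
      simp only [stepB, hcont]
      rw [if_neg (by simp), hget, ite_gt_eq_max, hdict, hacc]
    · have hcont : st1.contains y = false := by
        rw [PySem.Dict.contains_eq_decide_mem_keys, hkeys]
        simp [PySem.Set.mem_ofList, hy]
      have hofl : PySem.Set.ofList (p ++ [y]) = PySem.Set.ofList p ++ [y] := by
        rw [PySem.Set.ofList_append_singleton,
          PySem.Set.add_of_not_mem (by simpa [PySem.Set.mem_ofList] using hy)]
      have hyo : y ∉ PySem.Set.ofList p := by simpa [PySem.Set.mem_ofList] using hy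
      have hdict : PySem.Dict.mk ((PySem.Set.ofList (p ++ [y])).map
          (fun x => (x, firstI (p ++ [y]) x))) = st1.insert y (p.length : Int) := by
        apply PySem.Dict.ext
        rw [PySem.Dict.items_insert_of_not_contains _ _ hcont]
        rw [show (PySem.Dict.mk ((PySem.Set.ofList (p ++ [y])).map
          (fun x => (x, firstI (p ++ [y]) x)))).items = (PySem.Set.ofList (p ++ [y])).map
          (fun x => (x, firstI (p ++ [y]) x)) from rfl]
        rw [show st1.items = (PySem.Set.ofList p).map (fun x => (x, firstI p x)) from rfl]
        rw [hofl, List.map_append, List.map_cons, List.map_nil]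
        congr 1
        · apply List.map_congr_left
          intro x hx
          rw [firstI_append_mem y (hmemp x hx)]
        · rw [firstI_append_not_mem hy]
      have hacc : ((PySem.Set.ofList (p ++ [y])).map (fun x => spanOf (p ++ [y]) x)).foldl max (-1)
          = max (((PySem.Set.ofList p).map (fun x => spanOf p x)).foldl max (-1)) 1 := by
        rw [hofl, List.map_append, List.map_cons, List.map_nil, List.foldl_append,
          List.foldl_cons, List.foldl_nil]
        rw [show ((PySem.Set.ofList p).map (fun x => spanOf (p ++ [y]) x))
            = ((PySem.Set.ofList p).map (fun x => spanOf p x)) from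
          List.map_congr_left (fun x hx => spanOf_append_of_ne (hmemp x hx)
            (fun hh => hy (hh ▸ hmemp x hx))), spanOf_append_self_not_mem hy]
      rw [List.foldl_cons, List.foldl_nil]
      simp only [stepB, hcont, if_true, PySem.Dict.getD_insert_self]
      rw [ite_gt_eq_max, hdict, hacc]
      norm_num

lemma span_entry {p : List Int} {x : Int} (_hx : x ∈ p) :
    (if (entryL p x).length = 1 then (1:Int)
     else PySem.List.pyGetD (entryL p x) 1 0 - PySem.List.pyGetD (entryL p x) 0 0 + 1)
    = spanOf p x := by
  by_cases hc : p.count x = 1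
  · have h1 := lastI_eq_firstI_of_count_one hc
    simp [entryL, hc, spanOf, h1]
  · simp only [entryL, if_neg hc, spanOf]
    norm_num [PySem.List.pyGetD, PySem.List.pyIdx?, PySem.List.pyGet?]

theorem max_span_eq_alt (a : List Int) : max_span a = max_span_alt a := by
  have hB : max_span_alt a
      = ((PySem.Set.ofList a).map (fun x => spanOf a x)).foldl max (-1) := by
    show ((PySem.List.enumerate a).foldl stepB (PySem.Dict.empty, -1)).2 = _
    rw [stB_spec a]
  rw [hB]
  unfold max_span
  rw [max_span_dict_eq,
    show (dictA a).values = (dictA a).items.map (·.2) from rfl, dictA_items, List.map_map,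
    show ((·.2) ∘ fun x => (x, entryL a x)) = fun x => entryL a x from rfl,
    List.foldl_map]
  refine Eq.trans (PySem.List.foldl_congr_mem _ _ (fun m x => max m (spanOf a x)) _ ?_) ?_
  · intro acc x hxmem
    have hx : x ∈ a := (PySem.Set.mem_ofList _ _).mp hxmem
    simp only
    rw [← span_entry hx, ite_gt_eq_max]
  · rw [List.foldl_map]

-- ===== VERDICT (by name: the statement is the Claim_ definition above) =====
theorem max_span_spec : Claim_equal_max_span := by
  intro a _hdom
  unfold Spec_max_span
  exact max_span_eq_alt a
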